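-- pv_equiv track=rewrite | github.com/colinjansen/advent_of_code | 2015/day20.py | part_2
-- ===== SOURCE A (Python) =====
-- def part_2(INPUT):
--     max_house = INPUT // 11
--     houses = [0] * (max_house + 1)
--     house_number = max_house
--
--     for elf in range(1, max_house):
--         visits = 0
--         for house in range(elf, max_house + 1, elf):
--             if houses[house] == 0:
--                 houses[house] = 11 + elf * 11
--             else:
--                 houses[house] += elf * 11
--
--             if houses[house] >= INPUT and house < house_number:
--                 house_number = house
--
--             visits += 1
--             if visits == 50:
--                 break
--
--     return house_number
-- ===== SOURCE B (Python) =====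
-- def part_2(INPUT):
--     # Per-house direct gift: gift(h) = 11 + 11 * sum of h//k over k in 1..50 dividing h
--     # (the leading 11 reproduces A's first-visit bonus). Return first qualifying house.
--     max_house = INPUT // 11
--     for h in range(1, max_house):
--         s = 0
--         for k in range(1, 51):
--             if h % k == 0:
--                 s += h // k
--         if 11 + 11 * s >= INPUT:
--             return h
--     return max_house
-- ===== Notes on version B (the rewrite author's own statement) =====
-- stated objective: alternative
-- what changed: A sieves gifts over all elves into a houses array and tracks the minimum qualifying house; B builds no array: it computes each house's gift directly as a sum over the house's dividing quotients up to the visit limit (plus the first-visit bonus) and scans houses in increasing order, returning at the first qualifying one.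
import Mathlib
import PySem

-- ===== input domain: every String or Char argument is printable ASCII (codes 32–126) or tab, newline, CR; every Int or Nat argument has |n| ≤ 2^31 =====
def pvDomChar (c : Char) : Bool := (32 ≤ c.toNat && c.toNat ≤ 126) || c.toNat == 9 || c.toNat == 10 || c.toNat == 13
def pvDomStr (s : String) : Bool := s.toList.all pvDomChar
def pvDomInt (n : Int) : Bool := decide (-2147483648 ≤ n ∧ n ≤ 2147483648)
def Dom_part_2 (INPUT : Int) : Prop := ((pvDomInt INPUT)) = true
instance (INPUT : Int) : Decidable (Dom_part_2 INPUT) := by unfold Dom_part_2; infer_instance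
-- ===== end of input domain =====

-- B replaces A's elf sieve over a houses array by a direct per-house gift sum over the
-- dividing quotients within the visit limit, returning at the first qualifying house.

-- ===== PORT A =====
-- inner loop: 'for house in range(elf, max_house+1, elf): …' with the visits counter and break.
-- The Python list `houses` is an Array Int; every index `house` A uses is nonnegative and in
-- range (house ∈ [elf, max_house], len = max_house+1), so getD/setIfInBounds are exact here.
def pvElfLoop (INPUT elf : Int) : List Int → Int → Array Int × Int → Array Int × Int
  | [], _, st => st
  | house :: rest, visits, (hs, hn) =>
      let cur := hs.getD house.toNat 0
      let v := if cur = 0 then 11 + elf * 11 else cur + elf * 11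
      let hs' := hs.setIfInBounds house.toNat v
      let hn' := if INPUT ≤ v ∧ house < hn then house else hn
      if visits + 1 = 50 then (hs', hn')
      else pvElfLoop INPUT elf rest (visits + 1) (hs', hn')

def pvOuter (INPUT M : Int) (st : Array Int × Int) (elf : Int) : Array Int × Int :=
  pvElfLoop INPUT elf (PySem.List.pyRange elf (M + 1) elf) 0 st

def part_2 (INPUT : Int) : Int :=
  let max_house := PySem.Int.floordiv INPUT 11
  ((PySem.List.pyRange 1 max_house 1).foldl (pvOuter INPUT max_house)
      (Array.replicate (max_house + 1).toNat 0, max_house)).2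

-- ===== PORT B =====
-- 'for h in range(1, max_house): … return h' / fall-through 'return max_house'
def pvSearch (INPUT max_house : Int) : List Int → Int
  | [] => max_house
  | h :: rest =>
      let s := (PySem.List.pyRange 1 51 1).foldl
        (fun s k => if PySem.Int.mod h k = 0 then s + PySem.Int.floordiv h k else s) 0
      if INPUT ≤ 11 + 11 * s then h else pvSearch INPUT max_house rest

def part_2_alt (INPUT : Int) : Int :=
  let max_house := PySem.Int.floordiv INPUT 11
  pvSearch INPUT max_house (PySem.List.pyRange 1 max_house 1)

-- ===== PRECONDITION & SPEC =====
def Spec_part_2 (INPUT : Int) (out : Int) : Prop := out = part_2_alt INPUT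
instance (INPUT : Int) (out : Int) : Decidable (Spec_part_2 INPUT out) := by unfold Spec_part_2; infer_instance

-- ===== CLAIM (what is proved, stated in full; the proofs are below) =====
def Claim_equal_part_2 : Prop := ∀ (INPUT : Int), Dom_part_2 INPUT → Spec_part_2 INPUT (part_2 INPUT)

-- ===== LEMMAS AND PROOFS =====

-- a List-valued mirror of pvElfLoop/pvOuter (the invariant proof lives on lists;
-- pvElfLoop_lift/pvOuter_lift connect the Array-state port to it)
def pvElfLoopL (INPUT elf : Int) : List Int → Int → List Int × Int → List Int × Int
  | [], _, st => st
  | house :: rest, visits, (hs, hn) =>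
      let cur := PySem.List.pyGetD hs house 0
      let v := if cur = 0 then 11 + elf * 11 else cur + elf * 11
      let hs' := PySem.List.pySetD hs house v
      let hn' := if INPUT ≤ v ∧ house < hn then house else hn
      if visits + 1 = 50 then (hs', hn')
      else pvElfLoopL INPUT elf rest (visits + 1) (hs', hn')

def pvOuterL (INPUT M : Int) (st : List Int × Int) (elf : Int) : List Int × Int :=
  pvElfLoopL INPUT elf (PySem.List.pyRange elf (M + 1) elf) 0 st

lemma arr_getD_eq (hs : Array Int) (i : Int) (hi : 0 ≤ i) :
    hs.getD i.toNat 0 = PySem.List.pyGetD hs.toList i 0 := by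
  rw [PySem.List.pyGetD_of_nonneg _ _ hi, Array.getD_eq_getD_getElem?,
      List.getD_eq_getElem?_getD, ← Array.getElem?_toList]

lemma arr_set_eq (hs : Array Int) (i : Int) (v : Int) (hi : 0 ≤ i) :
    (hs.setIfInBounds i.toNat v).toList = PySem.List.pySetD hs.toList i v := by
  rw [PySem.List.pySetD_of_nonneg _ _ hi, Array.toList_setIfInBounds]

lemma pvElfLoop_lift (INPUT elf : Int) : ∀ (l : List Int) (v : Int) (hs : Array Int) (hn : Int),
    (∀ h ∈ l, 0 ≤ h) →
    ((pvElfLoop INPUT elf l v (hs, hn)).1.toList, (pvElfLoop INPUT elf l v (hs, hn)).2) =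
      pvElfLoopL INPUT elf l v (hs.toList, hn) := by
  intro l
  induction l with
  | nil => intro v hs hn _; rfl
  | cons house rest ih =>
      intro v hs hn hpos
      have hh0 : 0 ≤ house := hpos house (by simp)
      rw [pvElfLoop, pvElfLoopL]
      simp only [arr_getD_eq hs house hh0]
      by_cases hb : v + 1 = 50
      · rw [if_pos hb, if_pos hb]
        exact Prod.ext (arr_set_eq hs house _ hh0) rfl
      · rw [if_neg hb, if_neg hb, ← arr_set_eq hs house _ hh0]
        exact ih (v + 1) _ _ (fun h hm => hpos h (by simp [hm]))

lemma pvOuter_lift (INPUT M : Int) : ∀ (es : List Int) (hs : Array Int) (hn : Int),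
    (∀ e ∈ es, 1 ≤ e) →
    ((es.foldl (pvOuter INPUT M) (hs, hn)).1.toList, (es.foldl (pvOuter INPUT M) (hs, hn)).2) =
      es.foldl (pvOuterL INPUT M) (hs.toList, hn) := by
  intro es
  induction es with
  | nil => intro hs hn _; rfl
  | cons e rest ih =>
      intro hs hn hpos
      have he1 : 1 ≤ e := hpos e (by simp)
      rw [List.foldl_cons, List.foldl_cons]
      have hstep : ((pvOuter INPUT M (hs, hn) e).1.toList, (pvOuter INPUT M (hs, hn) e).2) =
          pvOuterL INPUT M (hs.toList, hn) e := by
        rw [pvOuter, pvOuterL]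
        exact pvElfLoop_lift INPUT e _ 0 hs hn (by
          intro h hm
          have := (PySem.List.mem_pyRange_iff_of_pos (by omega : (0:Int) < e) h).mp hm
          omega)
      have hrec := ih (pvOuter INPUT M (hs, hn) e).1 (pvOuter INPUT M (hs, hn) e).2
        (fun x hx => hpos x (by simp [hx]))
      rw [Prod.mk.eta] at hrec
      rw [hrec, hstep]

def pvStepv (elf v : Int) : Int := if v = 0 then 11 + elf * 11 else v + elf * 11

def pvProc (INPUT elf : Int) : List Int → List Int × Int → List Int × Int
  | [], st => st
  | house :: rest, (hs, hn) =>
      pvProc INPUT elf rest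
        (PySem.List.pySetD hs house (pvStepv elf (PySem.List.pyGetD hs house 0)),
         if INPUT ≤ pvStepv elf (PySem.List.pyGetD hs house 0) ∧ house < hn then house else hn)

lemma elfLoop_eq_proc (INPUT elf : Int) : ∀ (l : List Int) (v : Int) (st : List Int × Int),
    0 ≤ v → v < 50 →
    pvElfLoopL INPUT elf l v st = pvProc INPUT elf (l.take (50 - v).toNat) st := by
  intro l
  induction l with
  | nil => intro v st _ _; simp [pvElfLoopL, pvProc]
  | cons house rest ih =>
      intro v st h0 h50
      obtain ⟨hs, hn⟩ := st
      show pvElfLoopL INPUT elf (house :: rest) v (hs, hn) = _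
      rw [pvElfLoopL]
      by_cases hb : v + 1 = 50
      · have : (50 - v).toNat = 1 := by omega
        rw [this]
        simp [pvProc, hb, pvStepv]
      · have : (50 - v).toNat = (50 - (v+1)).toNat + 1 := by omega
        rw [this, List.take_succ_cons]
        rw [if_neg hb, ih (v+1) _ (by omega) (by omega)]
        rfl

lemma pyGetD_pySetD_int (hs : List Int) (i j v : Int) (hi : 0 ≤ i)
    (hilt : i < (hs.length : Int)) (hj : 0 ≤ j) :
    PySem.List.pyGetD (PySem.List.pySetD hs i v) j 0 =
      if j = i then v else PySem.List.pyGetD hs j 0 := by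
  have hi2 : i = ((i.toNat : Nat) : Int) := by omega
  have hj2 : j = ((j.toNat : Nat) : Int) := by omega
  rw [hi2, hj2, PySem.List.pyGetD_pySetD_natCast hs i.toNat j.toNat v 0 (by omega)]
  have hiff : j.toNat = i.toNat ↔ (j.toNat : Int) = (i.toNat : Int) := by omega
  split_ifs with h1 h2 h2 <;> first | rfl | (exact absurd (hiff.mp h1) h2) | (exact absurd (hiff.mpr h2) h1)

lemma proc_fst_len (INPUT elf : Int) : ∀ (l : List Int) (hs : List Int) (hn : Int),
    ((pvProc INPUT elf l (hs, hn)).1).length = hs.length := by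
  intro l
  induction l with
  | nil => intro hs hn; rfl
  | cons house rest ih =>
      intro hs hn
      rw [pvProc, ih]
      simp [PySem.List.length_pySetD]

lemma proc_fst_get (INPUT elf : Int) : ∀ (l : List Int) (hs : List Int) (hn : Int),
    (∀ h ∈ l, 0 ≤ h ∧ h < (hs.length : Int)) → l.Nodup →
    ∀ i : Int, 0 ≤ i → i < (hs.length : Int) →
    PySem.List.pyGetD (pvProc INPUT elf l (hs, hn)).1 i 0 =
      if i ∈ l then pvStepv elf (PySem.List.pyGetD hs i 0) else PySem.List.pyGetD hs i 0 := by
  intro l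
  induction l with
  | nil => intro hs hn _ _ i hi hilt; simp [pvProc]
  | cons house rest ih =>
      intro hs hn hrange hnd i hi hilt
      obtain ⟨hh0, hhlt⟩ := hrange house (by simp)
      have hlen : ((PySem.List.pySetD hs house (pvStepv elf (PySem.List.pyGetD hs house 0))).length : Int) = (hs.length : Int) := by
        simp [PySem.List.length_pySetD]
      have hr1 : ∀ h ∈ rest, 0 ≤ h ∧ h < ((PySem.List.pySetD hs house (pvStepv elf (PySem.List.pyGetD hs house 0))).length : Int) := by
        intro h hm; rw [hlen]; exact hrange h (by simp [hm])
      have hl2 : i < ((PySem.List.pySetD hs house (pvStepv elf (PySem.List.pyGetD hs house 0))).length : Int) := by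
        rw [hlen]; exact hilt
      rw [pvProc, ih _ _ hr1 (hnd.of_cons) i hi hl2]
      rw [pyGetD_pySetD_int hs house i _ hh0 hhlt hi]
      by_cases hir : i ∈ rest
      · have : i ≠ house := fun h => (List.nodup_cons.mp hnd).1 (h ▸ hir)
        simp [hir, this]
      · by_cases hih : i = house
        · subst hih
          simp [hir]
        · simp [hir, hih]

lemma proc_snd (INPUT elf : Int) : ∀ (l : List Int) (hs : List Int) (hn : Int),
    (∀ h ∈ l, 0 ≤ h ∧ h < (hs.length : Int)) → l.Nodup →
    (pvProc INPUT elf l (hs, hn)).2 =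
      l.foldl (fun b h =>
        if INPUT ≤ pvStepv elf (PySem.List.pyGetD hs h 0) ∧ h < b then h else b) hn := by
  intro l
  induction l with
  | nil => intro hs hn _ _; rfl
  | cons house rest ih =>
      intro hs hn hrange hnd
      obtain ⟨hh0, hhlt⟩ := hrange house (by simp)
      have hlen : ((PySem.List.pySetD hs house (pvStepv elf (PySem.List.pyGetD hs house 0))).length : Int) = (hs.length : Int) := by
        simp [PySem.List.length_pySetD]
      have hr1 : ∀ h ∈ rest, 0 ≤ h ∧ h < ((PySem.List.pySetD hs house (pvStepv elf (PySem.List.pyGetD hs house 0))).length : Int) := by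
        intro h hm; rw [hlen]; exact hrange h (by simp [hm])
      rw [pvProc, ih _ _ hr1 hnd.of_cons]
      rw [List.foldl_cons]
      apply PySem.List.foldl_congr_mem
      intro acc x hx
      rw [pyGetD_pySetD_int hs house x _ hh0 hhlt (hrange x (by simp [hx])).1]
      have : x ≠ house := fun h => (List.nodup_cons.mp hnd).1 (h ▸ hx)
      simp [this]

lemma fmin_le (q : Int → Prop) [DecidablePred q] : ∀ (l : List Int) (b : Int),
    l.foldl (fun b h => if q h ∧ h < b then h else b) b ≤ b := by
  intro l
  induction l with
  | nil => intro b; simp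
  | cons x rest ih =>
      intro b
      rw [List.foldl_cons]
      refine le_trans (ih _) ?_
      split_ifs with h
      · exact le_of_lt h.2
      · exact le_refl b

lemma fmin_cases (q : Int → Prop) [DecidablePred q] : ∀ (l : List Int) (b : Int),
    l.foldl (fun b h => if q h ∧ h < b then h else b) b = b ∨
      (l.foldl (fun b h => if q h ∧ h < b then h else b) b ∈ l ∧
        q (l.foldl (fun b h => if q h ∧ h < b then h else b) b)) := by
  intro l
  induction l with
  | nil => intro b; left; rfl
  | cons x rest ih =>
      intro b
      rw [List.foldl_cons]
      rcases ih (if q x ∧ x < b then x else b) with h | ⟨hm, hq⟩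
      · rw [h]
        split_ifs with hc
        · right; exact ⟨by simp, hc.1⟩
        · left; rfl
      · right; exact ⟨by simp [hm], hq⟩

lemma fmin_min (q : Int → Prop) [DecidablePred q] : ∀ (l : List Int) (b : Int) (h : Int),
    h ∈ l → q h → l.foldl (fun b h => if q h ∧ h < b then h else b) b ≤ h := by
  intro l
  induction l with
  | nil => intro b h hm; simp at hm
  | cons x rest ih =>
      intro b h hm hq
      rw [List.foldl_cons]
      rcases List.mem_cons.mp hm with rfl | hm'
      · refine le_trans (fmin_le q rest _) ?_
        split_ifs with hc
        · exact le_refl h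
        · push_neg at hc
          exact hc (by exact hq)
      · exact ih _ h hm' hq

noncomputable def pvVS (E h : Int) : Finset ℤ := (Finset.Icc 1 E).filter (fun e => e ∣ h ∧ h ≤ 50 * e)

noncomputable def pvCval (E h : Int) : Int := if pvVS E h = ∅ then 0 else 11 + ∑ e ∈ pvVS E h, 11 * e

lemma pvCval_zero (h : Int) : pvCval 0 h = 0 := by
  simp [pvCval, pvVS, Finset.Icc_eq_empty_of_lt (by norm_num : (1:Int) > 0)]

lemma sum_VS_pos (E h : Int) (hne : pvVS E h ≠ ∅) : 0 < ∑ e ∈ pvVS E h, 11 * e := by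
  apply Finset.sum_pos
  · intro e he
    have : 1 ≤ e := (Finset.mem_Icc.mp (Finset.mem_filter.mp he).1).1
    omega
  · exact Finset.nonempty_of_ne_empty hne

lemma pvCval_eq_zero_iff (E h : Int) : pvCval E h = 0 ↔ pvVS E h = ∅ := by
  unfold pvCval
  split_ifs with hc
  · simp [hc]
  · have := sum_VS_pos E h hc
    constructor
    · intro habs; omega
    · intro habs; exact absurd habs hc

lemma pvVS_succ (E h : Int) (hE : 0 ≤ E) :
    pvVS (E + 1) h =
      if (E + 1) ∣ h ∧ h ≤ 50 * (E + 1) then insert (E + 1) (pvVS E h) else pvVS E h := by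
  have hicc : Finset.Icc (1:Int) (E + 1) = insert (E + 1) (Finset.Icc 1 E) := by
    ext x; simp [Finset.mem_Icc, Finset.mem_insert]; omega
  unfold pvVS
  rw [hicc, Finset.filter_insert]

lemma notmem_VS (E h : Int) : (E + 1) ∉ pvVS E h := by
  intro habs
  have := (Finset.mem_Icc.mp (Finset.mem_filter.mp habs).1).2
  omega

lemma pvCval_succ (E h : Int) (hE : 0 ≤ E) :
    pvCval (E + 1) h =
      if (E + 1) ∣ h ∧ h ≤ 50 * (E + 1) then pvStepv (E + 1) (pvCval E h) else pvCval E h := by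
  by_cases hc : (E + 1) ∣ h ∧ h ≤ 50 * (E + 1)
  · rw [if_pos hc, pvCval, pvVS_succ E h hE, if_pos hc, if_neg (by simp),
        Finset.sum_insert (notmem_VS E h)]
    by_cases hemp : pvVS E h = ∅
    · rw [pvStepv, if_pos ((pvCval_eq_zero_iff E h).mpr hemp)]
      simp [hemp]
      ring
    · rw [pvStepv, if_neg (fun habs => hemp ((pvCval_eq_zero_iff E h).mp habs)), pvCval, if_neg hemp]
      ring
  · rw [if_neg hc, pvCval, pvVS_succ E h hE, if_neg hc, ← pvCval]

lemma pvCval_nonneg (E h : Int) : 0 ≤ pvCval E h := by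
  rw [pvCval]
  split_ifs with hc
  · exact le_refl 0
  · have := sum_VS_pos E h hc
    omega

lemma pvCval_mono_succ (E h : Int) (hE : 0 ≤ E) : pvCval E h ≤ pvCval (E + 1) h := by
  rw [pvCval_succ E h hE]
  split_ifs with hc
  · rw [pvStepv]
    have := pvCval_nonneg E h
    split_ifs with h0 <;> omega
  · exact le_refl _

lemma visit_eq_map (e M : Int) (he : 1 ≤ e) :
    (PySem.List.pyRange e (M + 1) e).take 50 =
      (List.range (min 50 (if e ≤ M then (M / e).toNat else 0))).map
        (fun k : Nat => e + e * (k : Int)) := by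
  rw [PySem.List.pyRange_of_pos e (M+1) (by omega)]
  simp [← List.map_take, List.take_range]

lemma nodup_visit (e M : Int) (he : 1 ≤ e) :
    ((PySem.List.pyRange e (M + 1) e).take 50).Nodup := by
  rw [visit_eq_map e M he]
  refine List.Nodup.map ?_ (List.nodup_range)
  intro a b hab
  have h1 : e * (a:Int) = e * (b:Int) := by
    simp only [] at hab
    linarith
  have : (a : Int) = (b : Int) := mul_left_cancel₀ (by omega) h1
  exact_mod_cast this

lemma mem_visit (e M x : Int) (he : 1 ≤ e) :
    x ∈ (PySem.List.pyRange e (M + 1) e).take 50 ↔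
      e ∣ x ∧ e ≤ x ∧ x ≤ M ∧ x ≤ 50 * e := by
  rw [visit_eq_map e M he]
  simp only [List.mem_map, List.mem_range]
  constructor
  · rintro ⟨k, hk, rfl⟩
    by_cases hlt : e ≤ M
    · rw [if_pos hlt] at hk
      have h0 : (0:Int) ≤ M / e := Int.ediv_nonneg (by omega) (by omega)
      have hkN : k < (M / e).toNat := lt_of_lt_of_le hk (min_le_right _ _)
      have hk50n : k < 50 := lt_of_lt_of_le hk (min_le_left _ _)
      have hk2 : (k : Int) + 1 ≤ M / e := by omega
      have hk50 : (k : Int) < 50 := by omega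
      have hk0 : (0:Int) ≤ (k:Int) := by positivity
      have hxM : e + e * (k : Int) ≤ M := by
        have := (Int.le_ediv_iff_mul_le (by omega : (0:Int) < e)).mp hk2
        nlinarith
      refine ⟨⟨(k:Int) + 1, by ring⟩, by nlinarith, hxM, by nlinarith⟩
    · rw [if_neg hlt] at hk
      omega
  · rintro ⟨⟨c, hc⟩, hex, hxM, hx50⟩
    have he0 : (0:Int) < e := by omega
    have hc1 : 1 ≤ c := by nlinarith
    have hc50 : c ≤ 50 := by nlinarith
    have hcM : c ≤ M / e := by
      rw [Int.le_ediv_iff_mul_le he0]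
      nlinarith
    have h0 : (0:Int) ≤ M / e := le_trans (by omega) hcM
    refine ⟨(c - 1).toNat, ?_, ?_⟩
    · rw [if_pos (by omega : e ≤ M)]
      have hlt50 : (c - 1).toNat < 50 := by omega
      have hltc : (c - 1).toNat < (M / e).toNat := by omega
      omega
    · have hcast : (((c - 1).toNat : Nat) : Int) = c - 1 := by omega
      rw [hcast, hc]
      ring

def pvInv (INPUT M E : Int) (st : List Int × Int) : Prop :=
  st.1.length = (M + 1).toNat ∧
  (∀ h : Int, 1 ≤ h → h ≤ M → PySem.List.pyGetD st.1 h 0 = pvCval E h) ∧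
  1 ≤ st.2 ∧ st.2 ≤ M ∧
  (∀ h : Int, 1 ≤ h → h < st.2 → ¬ INPUT ≤ pvCval E h) ∧
  (st.2 = M ∨ INPUT ≤ pvCval E st.2)

lemma inv_step (INPUT M E : Int) (st : List Int × Int) (hM : 1 ≤ M) (hE : 0 ≤ E)
    (hinv : pvInv INPUT M E st) : pvInv INPUT M (E + 1) (pvOuterL INPUT M st (E + 1)) := by
  obtain ⟨hs, hn⟩ := st
  obtain ⟨hlen, hget, hn1, hnM, hnolow, hql⟩ := hinv
  simp only [] at hlen hget hn1 hnM hnolow hql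
  have he1 : 1 ≤ E + 1 := by omega
  have houter : pvOuterL INPUT M (hs, hn) (E + 1) =
      pvProc INPUT (E + 1) ((PySem.List.pyRange (E + 1) (M + 1) (E + 1)).take 50) (hs, hn) := by
    rw [pvOuterL, elfLoop_eq_proc INPUT (E + 1) _ 0 _ (le_refl 0) (by norm_num),
        show ((50:Int) - 0).toNat = 50 by decide]
  have hrange : ∀ h ∈ (PySem.List.pyRange (E + 1) (M + 1) (E + 1)).take 50,
      0 ≤ h ∧ h < (hs.length : Int) := by
    intro h hm
    obtain ⟨_, hge, hle, _⟩ := (mem_visit (E + 1) M h he1).mp hm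
    rw [hlen]
    omega
  have hnd := nodup_visit (E + 1) M he1
  have hsnd := proc_snd INPUT (E + 1) _ hs hn hrange hnd
  -- the value predicate driving the running minimum
  have hq : ∀ h, 1 ≤ h → h ≤ M → (INPUT ≤ pvStepv (E + 1) (PySem.List.pyGetD hs h 0) ↔
      INPUT ≤ pvStepv (E + 1) (pvCval E h)) := by
    intro h h1 h2
    rw [hget h h1 h2]
  have hmemval : ∀ h ∈ (PySem.List.pyRange (E + 1) (M + 1) (E + 1)).take 50,
      pvCval (E + 1) h = pvStepv (E + 1) (PySem.List.pyGetD hs h 0) := by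
    intro h hm
    obtain ⟨hdvd, hge, hle, h50⟩ := (mem_visit (E + 1) M h he1).mp hm
    rw [pvCval_succ E h hE, if_pos ⟨hdvd, h50⟩, hget h (by omega) hle]
  have hnotmemval : ∀ h : Int, 1 ≤ h → h ≤ M →
      h ∉ (PySem.List.pyRange (E + 1) (M + 1) (E + 1)).take 50 →
      pvCval (E + 1) h = pvCval E h := by
    intro h h1 h2 hnm
    rw [pvCval_succ E h hE, if_neg]
    intro ⟨hdvd, h50⟩
    exact hnm ((mem_visit (E + 1) M h he1).mpr
      ⟨hdvd, Int.le_of_dvd (by omega) hdvd, h2, h50⟩)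
  refine ⟨?_, ?_, ?_, ?_, ?_, ?_⟩
  · rw [houter, proc_fst_len]; exact hlen
  · intro h h1 h2
    rw [houter, proc_fst_get INPUT (E + 1) _ hs hn hrange hnd h (by omega) (by rw [hlen]; omega)]
    by_cases hm : h ∈ (PySem.List.pyRange (E + 1) (M + 1) (E + 1)).take 50
    · rw [if_pos hm, hmemval h hm]
    · rw [if_neg hm, hget h h1 h2, hnotmemval h h1 h2 hm]
  · rw [houter, hsnd]
    rcases fmin_cases (fun h => INPUT ≤ pvStepv (E + 1) (PySem.List.pyGetD hs h 0)) _ hn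
      with hcase | ⟨hmem, _⟩
    · rw [hcase]; exact hn1
    · obtain ⟨_, hge, _, _⟩ := (mem_visit (E + 1) M _ he1).mp hmem
      omega
  · rw [houter, hsnd]
    exact le_trans (fmin_le _ _ _) hnM
  · intro h h1 hlow
    rw [houter, hsnd] at hlow
    by_cases hm : h ∈ (PySem.List.pyRange (E + 1) (M + 1) (E + 1)).take 50
    · intro habs
      rw [hmemval h hm] at habs
      have := fmin_min (fun h => INPUT ≤ pvStepv (E + 1) (PySem.List.pyGetD hs h 0)) _ hn h hm habs
      beta_reduce at this
      omega
    · have hhM : h ≤ M := by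
        have := le_trans (le_of_lt hlow) (le_trans (fmin_le _ _ _) hnM)
        omega
      rw [hnotmemval h h1 hhM hm]
      exact hnolow h h1 (lt_of_lt_of_le hlow (fmin_le _ _ _))
  · rw [houter, hsnd]
    rcases fmin_cases (fun h => INPUT ≤ pvStepv (E + 1) (PySem.List.pyGetD hs h 0)) _ hn
      with hcase | ⟨hmem, hqv⟩
    · rw [hcase]
      rcases hql with hM' | hv
      · exact Or.inl hM'
      · exact Or.inr (le_trans hv (pvCval_mono_succ E hn hE))
    · right
      rw [hmemval _ hmem]
      exact hqv

lemma inv_all (INPUT M : Int) (h11 : 11 ≤ INPUT) (hM : 1 ≤ M) : ∀ n : Nat, (n : Int) ≤ M - 1 →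
    pvInv INPUT M (n : Int)
      ((PySem.List.pyRange 1 ((n : Int) + 1) 1).foldl (pvOuterL INPUT M)
        (List.replicate (M + 1).toNat 0, M)) := by
  intro n
  induction n with
  | zero =>
      intro _
      rw [show ((0:Nat):Int) + 1 = 1 by norm_num, PySem.List.pyRange_one_eq_nil (le_refl 1),
          List.foldl_nil]
      refine ⟨by simp, ?_, hM, le_refl M, ?_, Or.inl rfl⟩
      · intro h h1 h2
        rw [PySem.List.pyGetD_eq_getElem _ _ (by omega) (by simp; omega)]
        simp [List.getElem_replicate, pvCval_zero]
      · intro h _ _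
        rw [show ((0:Nat):Int) = 0 by norm_num, pvCval_zero]
        omega
  | succ k ih =>
      intro hle
      have hk : (k : Int) ≤ M - 1 := by push_cast at hle ⊢; omega
      have hcast : ((k + 1 : Nat) : Int) = (k : Int) + 1 := by push_cast; ring
      rw [hcast, PySem.List.pyRange_one_succ_right (by omega), List.foldl_append,
          List.foldl_cons, List.foldl_nil]
      exact inv_step INPUT M (k : Int) _ hM (by positivity) (ih hk)

def pvGiftB (h : Int) : Int :=
  11 + 11 * ((PySem.List.pyRange 1 51 1).foldl
    (fun s k => if PySem.Int.mod h k = 0 then s + PySem.Int.floordiv h k else s) 0)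

lemma search_spec (INPUT M : Int) : ∀ (n : Nat) (a : Int), 1 ≤ a → a ≤ M → M - a = (n : Int) →
    a ≤ pvSearch INPUT M (PySem.List.pyRange a M 1) ∧
    pvSearch INPUT M (PySem.List.pyRange a M 1) ≤ M ∧
    (∀ h, a ≤ h → h < pvSearch INPUT M (PySem.List.pyRange a M 1) → ¬ INPUT ≤ pvGiftB h) ∧
    (pvSearch INPUT M (PySem.List.pyRange a M 1) = M ∨
      INPUT ≤ pvGiftB (pvSearch INPUT M (PySem.List.pyRange a M 1))) := by
  intro n
  induction n with
  | zero =>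
      intro a h1 haM hMa
      have : a = M := by omega
      subst this
      rw [PySem.List.pyRange_one_eq_nil (le_refl a), show pvSearch INPUT a [] = a from rfl]
      exact ⟨le_refl _, le_refl _, by intro h hh1 hh2; omega, Or.inl rfl⟩
  | succ k ih =>
      intro a h1 haM hMa
      have haM' : a < M := by omega
      rw [PySem.List.pyRange_one_cons haM']
      show a ≤ pvSearch INPUT M (a :: _) ∧ _
      by_cases hq : INPUT ≤ pvGiftB a
      · have hres : pvSearch INPUT M (a :: PySem.List.pyRange (a + 1) M 1) = a := by
          rw [pvSearch]
          simp only [pvGiftB] at hq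
          rw [if_pos hq]
        rw [hres]
        exact ⟨le_refl a, by omega, by intro h hh1 hh2; omega, Or.inr (hres ▸ hq)⟩
      · have hres : pvSearch INPUT M (a :: PySem.List.pyRange (a + 1) M 1) =
            pvSearch INPUT M (PySem.List.pyRange (a + 1) M 1) := by
          rw [pvSearch]
          simp only [pvGiftB] at hq
          rw [if_neg hq]
        rw [hres]
        obtain ⟨ha1, ha2, ha3, ha4⟩ := ih (a + 1) (by omega) (by omega) (by push_cast at hMa ⊢; omega)
        refine ⟨by omega, ha2, ?_, ha4⟩
        intro h hh1 hh2
        by_cases hha : h = a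
        · subst hha; exact hq
        · exact ha3 h (by omega) hh2

lemma foldl_gift (h : Int) :
    (PySem.List.pyRange 1 51 1).foldl
      (fun s k => if PySem.Int.mod h k = 0 then s + PySem.Int.floordiv h k else s) 0 =
    ∑ k ∈ (Finset.Icc (1:ℤ) 50).filter (· ∣ h), h / k := by
  rw [PySem.List.foldl_ite_eq_foldl_filter (fun k => PySem.Int.mod h k = 0)
        (fun s k => s + PySem.Int.floordiv h k) _ 0,
      PySem.List.foldl_add _ (fun k => PySem.Int.floordiv h k) 0, zero_add]
  have hnd : ((PySem.List.pyRange 1 51 1).filter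
      (fun k => decide (PySem.Int.mod h k = 0))).Nodup :=
    (PySem.List.nodup_pyRange_one 1 51).filter _
  rw [← List.sum_toFinset _ hnd]
  have hset : ((PySem.List.pyRange 1 51 1).filter
      (fun k => decide (PySem.Int.mod h k = 0))).toFinset =
      (Finset.Icc (1:ℤ) 50).filter (· ∣ h) := by
    ext k
    simp only [List.mem_toFinset, List.mem_filter, Finset.mem_filter, Finset.mem_Icc,
      PySem.List.mem_pyRange_one, decide_eq_true_eq, PySem.Int.mod_eq_zero_iff_dvd]
    omega
  rw [hset]
  apply Finset.sum_congr rfl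
  intro k hk
  have : 1 ≤ k := (Finset.mem_Icc.mp (Finset.mem_filter.mp hk).1).1
  exact PySem.Int.floordiv_eq_ediv_of_pos (by omega)

lemma sum_divisors_swap (M h : Int) (h1 : 1 ≤ h) (hM : h ≤ M - 1) :
    ∑ e ∈ pvVS (M - 1) h, e = ∑ k ∈ (Finset.Icc (1:ℤ) 50).filter (· ∣ h), h / k := by
  apply Finset.sum_nbij' (fun e => h / e) (fun k => h / k)
  · intro e he
    have hmf := Finset.mem_filter.mp he
    obtain ⟨he1, heM⟩ := Finset.mem_Icc.mp hmf.1
    have h50 := hmf.2.2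
    obtain ⟨c, hc⟩ := hmf.2.1
    have he0 : (0:Int) < e := by omega
    have hdivc : h / e = c := by rw [hc]; exact Int.mul_ediv_cancel_left c (by omega)
    have hc1 : 1 ≤ c := by nlinarith
    have hc50 : c ≤ 50 := by nlinarith
    rw [hdivc]
    exact Finset.mem_filter.mpr ⟨Finset.mem_Icc.mpr ⟨hc1, hc50⟩, ⟨e, by rw [hc]; ring⟩⟩
  · intro k hk
    obtain ⟨hicc, hdvd⟩ := Finset.mem_filter.mp hk
    obtain ⟨hk1, hk50⟩ := Finset.mem_Icc.mp hicc
    obtain ⟨c, hc⟩ := hdvd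
    have hk0 : (0:Int) < k := by omega
    have hdivc : h / k = c := by rw [hc]; exact Int.mul_ediv_cancel_left c (by omega)
    have hc1 : 1 ≤ c := by nlinarith
    have hch : c ≤ h := by nlinarith
    rw [hdivc]
    refine Finset.mem_filter.mpr ⟨Finset.mem_Icc.mpr ⟨hc1, by omega⟩, ⟨k, by rw [hc]; ring⟩, by nlinarith⟩
  · intro e he
    obtain ⟨c, hc⟩ := (Finset.mem_filter.mp he).2.1
    have he0 : (0:Int) < e := by
      have := (Finset.mem_Icc.mp (Finset.mem_filter.mp he).1).1
      omega
    have hc1 : 1 ≤ c := by nlinarith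
    have hdivc : h / e = c := by rw [hc]; exact Int.mul_ediv_cancel_left c (by omega)
    rw [hdivc, hc, mul_comm]
    exact Int.mul_ediv_cancel_left e (by omega)
  · intro k hk
    obtain ⟨c, hc⟩ := (Finset.mem_filter.mp hk).2
    have hk0 : (0:Int) < k := by
      have := (Finset.mem_Icc.mp (Finset.mem_filter.mp hk).1).1
      omega
    have hc1 : 1 ≤ c := by nlinarith
    have hdivc : h / k = c := by rw [hc]; exact Int.mul_ediv_cancel_left c (by omega)
    rw [hdivc, hc, mul_comm]
    exact Int.mul_ediv_cancel_left k (by omega)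
  · intro e he
    obtain ⟨c, hc⟩ := (Finset.mem_filter.mp he).2.1
    have he0 : (0:Int) < e := by
      have := (Finset.mem_Icc.mp (Finset.mem_filter.mp he).1).1
      omega
    have hc1 : 1 ≤ c := by nlinarith
    have hdivc : h / e = c := by rw [hc]; exact Int.mul_ediv_cancel_left c (by omega)
    rw [hdivc, hc, mul_comm]
    exact (Int.mul_ediv_cancel_left e (by omega)).symm

lemma giftB_eq (M h : Int) (h1 : 1 ≤ h) (hM : h ≤ M - 1) : pvGiftB h = pvCval (M - 1) h := by
  have hmem : h ∈ pvVS (M - 1) h :=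
    Finset.mem_filter.mpr ⟨Finset.mem_Icc.mpr ⟨h1, hM⟩, dvd_refl h, by omega⟩
  have hne : pvVS (M - 1) h ≠ ∅ := fun habs => by simp [habs] at hmem
  rw [pvGiftB, foldl_gift, pvCval, if_neg hne, ← sum_divisors_swap M h h1 hM,
      Finset.mul_sum]

-- ===== VERDICT (by name: the statement is the Claim_ definition above) =====
theorem part_2_spec : Claim_equal_part_2 := by
  intro INPUT _
  show part_2 INPUT = part_2_alt INPUT
  simp only [part_2, part_2_alt]
  set M := PySem.Int.floordiv INPUT 11 with hMdef
  by_cases hM2 : M ≤ 1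
  · rw [PySem.List.pyRange_one_eq_nil hM2]
    rfl
  · push_neg at hM2
    have h11 : 11 ≤ INPUT := by
      have h22 : 2 * 11 ≤ INPUT := by
        rw [← PySem.Int.le_floordiv_iff_mul_le (by norm_num)]
        omega
      omega
    set n : Nat := (M - 1).toNat with hndef
    have hcast : (n : Int) = M - 1 := by omega
    have hinv := inv_all INPUT M h11 (by omega) n (by omega)
    rw [hcast, show M - 1 + 1 = M by ring] at hinv
    obtain ⟨_, _, hA1, hAM, hAno, hAq⟩ := hinv
    have hsearch := search_spec INPUT M (M - 1).toNat 1 (le_refl 1) (by omega) (by omega)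
    obtain ⟨hB1, hBM, hBno, hBq⟩ := hsearch
    have hlift := pvOuter_lift INPUT M (PySem.List.pyRange 1 M 1)
      (Array.replicate (M + 1).toNat 0) M
      (fun e he => ((PySem.List.mem_pyRange_one).mp he).1)
    rw [Array.toList_replicate] at hlift
    rw [show ((PySem.List.pyRange 1 M 1).foldl (pvOuter INPUT M)
          (Array.replicate (M + 1).toNat 0, M)).2 =
        ((PySem.List.pyRange 1 M 1).foldl (pvOuterL INPUT M)
          (List.replicate (M + 1).toNat 0, M)).2 from congrArg Prod.snd hlift]
    set rA := ((PySem.List.pyRange 1 M 1).foldl (pvOuterL INPUT M)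
      (List.replicate (M + 1).toNat 0, M)).2 with hrAdef
    set rB := pvSearch INPUT M (PySem.List.pyRange 1 M 1) with hrBdef
    rcases lt_trichotomy rA rB with hlt | heq | hgt
    · exfalso
      have hnq := hBno rA hA1 hlt
      have hne : rA ≠ M := by omega
      have hle : rA ≤ M - 1 := by omega
      rcases hAq with hc | hc
      · exact hne hc
      · exact hnq (giftB_eq M rA (by omega) hle ▸ hc)
    · exact heq
    · exfalso
      have hnq := hAno rB hB1 hgt
      have hne : rB ≠ M := by omega
      have hle : rB ≤ M - 1 := by omega
      rcases hBq with hc | hc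
      · exact hne hc
      · exact hnq ((giftB_eq M rB (by omega) hle).symm ▸ hc)
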